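-- pv_equiv track=rewrite | github.com/tiffsoa/a08_2022 | dicts_soln.py | build_placements
-- ===== SOURCE A (Python) =====
-- def build_placements(shoes_at_finish_line: list[str]) -> dict[str, list[int]]:
--     """Return a dictionary built from the information in
--     shoes_at_finish_line, where each key is a brand and each value is
--     a list of placements by people wearing shoes made by that
--     company. shoes_at_finish_line contains shoe brands in order, in
--     which they appeared at the finish line.
--
--     >>> result = build_placements(['Saucony', 'Asics', 'Asics', 'NB',
--     ...                            'Saucony', 'Nike', 'Asics', 'Adidas',
--     ...                            'Saucony', 'Asics'])
--     >>> result == {'Saucony': [1, 5, 9], 'Asics': [2, 3, 7, 10], 'NB': [4],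
--     ...                        'Nike': [6], 'Adidas': [8]}
--     True
--     >>> build_placements([])
--     {}
--     >>> build_placements(['Nike']) == {'Nike': [1]}
--     True
--     >>> build_placements(['NB', 'NB', 'NB']) == {'NB': [1, 2, 3]}
--     True
--     >>> result = build_placements(['NB', 'Nike', 'NB', 'Nike', 'NB'])
--     >>> result == {'NB': [1, 3, 5], 'Nike': [2, 4]}
--     True
--
--     """
--
--     brand_to_placement = {}
--
--     for i in range(len(shoes_at_finish_line)):
--         brand = shoes_at_finish_line[i]
--         if brand in brand_to_placement:
--             brand_to_placement[brand].append(i + 1)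
--         else:
--             brand_to_placement[brand] = [i + 1]
--
--     return brand_to_placement
-- ===== SOURCE B (Python) =====
-- def build_placements(shoes_at_finish_line: list[str]) -> dict[str, list[int]]:
--     """Group finish positions (1-based) by shoe brand."""
--     return {brand: [i + 1 for i, b in enumerate(shoes_at_finish_line) if b == brand]
--             for brand in dict.fromkeys(shoes_at_finish_line)}
-- ===== Notes on version B (the rewrite author's own statement) =====
-- stated objective: idiomatic
-- what changed: Replaces A's single accumulating pass (per-element dict membership test + append/insert) by a dict comprehension: first the distinct brands via dict.fromkeys, then one enumerate scan per brand collecting its 1-based positions.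
import Mathlib
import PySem

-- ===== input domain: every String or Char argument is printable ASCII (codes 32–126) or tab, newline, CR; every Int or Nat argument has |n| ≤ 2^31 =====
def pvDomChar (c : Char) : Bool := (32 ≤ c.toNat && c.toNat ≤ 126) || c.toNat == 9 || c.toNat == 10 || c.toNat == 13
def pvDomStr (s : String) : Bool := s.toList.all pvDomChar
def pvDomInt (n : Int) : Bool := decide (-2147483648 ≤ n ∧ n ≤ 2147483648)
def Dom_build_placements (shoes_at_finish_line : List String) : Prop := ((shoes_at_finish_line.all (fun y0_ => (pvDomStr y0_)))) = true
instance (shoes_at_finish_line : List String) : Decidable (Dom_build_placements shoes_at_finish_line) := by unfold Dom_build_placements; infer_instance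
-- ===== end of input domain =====

-- B replaces A's single accumulating dict pass by a dict comprehension over the distinct
-- brands (dict.fromkeys) with one enumerate scan per brand; objective: idiomatic.

-- ===== PORT A =====
-- for i in range(len(xs)): brand = xs[i]; if brand in d: d[brand].append(i+1) else d[brand] = [i+1]
def build_placements (shoes_at_finish_line : List String) : List (String × List Int) :=
  (List.foldl
    (fun (d : PySem.Dict String (List Int)) (i : Int) =>
      let brand := PySem.List.pyGetD shoes_at_finish_line i ""
      if d.contains brand then d.modify brand [] (fun v => v ++ [i + 1])
      else d.insert brand [i + 1])
    PySem.Dict.empty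
    (PySem.List.pyRange 0 (PySem.List.len shoes_at_finish_line))).items

-- ===== PORT B =====
-- {brand: [i+1 for i, b in enumerate(xs) if b == brand] for brand in dict.fromkeys(xs)}
def build_placements_alt (shoes_at_finish_line : List String) : List (String × List Int) :=
  (PySem.List.dedup shoes_at_finish_line).map (fun brand =>
    (brand,
     ((PySem.List.enumerate shoes_at_finish_line).filter (fun p => p.2 == brand)).map
       (fun p => p.1 + 1)))

-- ===== PRECONDITION & SPEC =====
def Spec_build_placements (shoes_at_finish_line : List String) (out : List (String × List Int)) : Prop := out = build_placements_alt shoes_at_finish_line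
instance (shoes_at_finish_line : List String) (out : List (String × List Int)) : Decidable (Spec_build_placements shoes_at_finish_line out) := by unfold Spec_build_placements; infer_instance

-- ===== CLAIM (what is proved, stated in full; the proofs are below) =====
def Claim_equal_build_placements : Prop := ∀ (shoes_at_finish_line : List String), Dom_build_placements shoes_at_finish_line → Spec_build_placements shoes_at_finish_line (build_placements shoes_at_finish_line)

-- ===== LEMMAS AND PROOFS =====

-- A's branch ('in dict' → append, else fresh singleton) IS an unconditional d[brand] = d.get(brand, []) + [i+1].
theorem step_eq_modify (d : PySem.Dict String (List Int)) (b : String) (n : Int) :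
    (if d.contains b then d.modify b [] (fun v => v ++ [n]) else d.insert b [n])
      = d.modify b [] (fun v => v ++ [n]) := by
  by_cases h : d.contains b = true
  · simp [h]
  · simp only [Bool.not_eq_true] at h
    simp [h, PySem.Dict.modify, PySem.Dict.getD_of_not_contains d [] h]

-- A's loop rephrased as a fold over (brand, position) pairs.
theorem loopA_eq_fold (xs : List String) :
    build_placements xs
      = (List.foldl (fun (d : PySem.Dict String (List Int)) p => d.modify p.1 [] (fun v => v ++ [p.2]))
          PySem.Dict.empty
          ((PySem.List.enumerate xs).map (fun p => (p.2, p.1 + 1)))).items := by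
  unfold build_placements
  rw [PySem.List.enumerate_eq_map_pyRange xs ""]
  rw [List.map_map, List.foldl_map]
  congr 1
  apply PySem.List.foldl_congr_mem
  intro d i _
  simpa using step_eq_modify d (PySem.List.pyGetD xs i "") (i + 1)

theorem build_placements_spec_aux (xs : List String) :
    build_placements xs = build_placements_alt xs := by
  rw [loopA_eq_fold]
  set l := (PySem.List.enumerate xs).map (fun p : Int × String => (p.2, p.1 + 1)) with hl
  have hkeys : (List.foldl (fun (d : PySem.Dict String (List Int)) p => d.modify p.1 [] (fun v => v ++ [p.2]))
      PySem.Dict.empty l).keys = PySem.List.dedup xs := by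
    have := PySem.Dict.keys_foldl_modify_key l (fun p => p.1) [] (fun _ p v => v ++ [p.2]) PySem.Dict.empty
    simp only [hl, List.map_map] at this ⊢
    rw [this]
    have hmap : (PySem.List.enumerate xs).map ((fun p : String × Int => p.1) ∘ (fun p : Int × String => (p.2, p.1 + 1))) = xs := by
      simp [Function.comp_def]
    rw [hmap]
    simp [PySem.Dict.keys_empty, PySem.Set.update, PySem.Set.ofList_eq_foldl]
  have hnd : (List.foldl (fun (d : PySem.Dict String (List Int)) p => d.modify p.1 [] (fun v => v ++ [p.2]))
      PySem.Dict.empty l).keys.Nodup := by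
    have := PySem.Dict.nodup_keys_foldl_modify_key l (fun p => p.1) [] (fun _ p v => v ++ [p.2]) PySem.Dict.empty
    exact this (by simp [PySem.Dict.keys_empty])
  rw [PySem.Dict.items_eq_map_keys _ hnd [], hkeys]
  unfold build_placements_alt
  apply List.map_congr_left
  intro brand _
  have := PySem.Dict.getD_foldl_modify_append l PySem.Dict.empty brand
  simp only [PySem.Dict.getD_empty, List.nil_append] at this
  rw [this, hl, List.filter_map, List.map_map]
  congr 1

-- ===== VERDICT (by name: the statement is the Claim_ definition above) =====
theorem build_placements_spec : Claim_equal_build_placements := by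
  intro xs _
  exact build_placements_spec_aux xs
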